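-- pv_equiv track=rewrite | github.com/janioanselmo/ScreenChurchProject | main_window.py | format_text_blocks
-- ===== SOURCE A (Python) =====
-- def format_text_blocks(text, max_lines=4):
--     lines = [line.strip() for line in text.splitlines()]
--     slides = []
--     current = []
--     for line in lines:
--         if not line:
--             if current:
--                 slides.append("\n".join(current))
--                 current = []
--             continue
--         current.append(line)
--         if len(current) >= max_lines:
--             slides.append("\n".join(current))
--             current = []
--     if current:
--         slides.append("\n".join(current))
--     return "\n\n".join(slides)
-- ===== SOURCE B (Python) =====
-- def format_text_blocks(text, max_lines=4):
--     step = max(max_lines, 1)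
--     paras = []
--     group = []
--     for line in (l.strip() for l in text.splitlines()):
--         if line:
--             group.append(line)
--         elif group:
--             paras.append(group)
--             group = []
--     if group:
--         paras.append(group)
--     slides = []
--     for p in paras:
--         while p:
--             slides.append("\n".join(p[:step]))
--             p = p[step:]
--     return "\n\n".join(slides)
-- ===== Notes on version B (the rewrite author's own statement) =====
-- stated objective: alternative
-- what changed: Replaces A's single stateful scan (which interleaves blank-line flushing with max_lines flushing) by two separate passes: first group the stripped lines into paragraphs at blank lines, then chunk each paragraph into slides of size max(max_lines,1) by slicing.
import Mathlib
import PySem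

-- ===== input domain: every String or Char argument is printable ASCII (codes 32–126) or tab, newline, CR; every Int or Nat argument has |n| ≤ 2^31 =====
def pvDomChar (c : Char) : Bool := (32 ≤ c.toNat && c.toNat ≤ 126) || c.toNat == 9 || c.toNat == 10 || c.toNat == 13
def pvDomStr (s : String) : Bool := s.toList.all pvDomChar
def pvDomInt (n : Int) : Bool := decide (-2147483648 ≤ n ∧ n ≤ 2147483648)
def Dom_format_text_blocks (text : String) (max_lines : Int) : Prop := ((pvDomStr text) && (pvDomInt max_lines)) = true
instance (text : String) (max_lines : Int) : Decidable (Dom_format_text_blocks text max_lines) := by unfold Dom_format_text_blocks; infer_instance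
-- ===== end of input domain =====

-- B groups lines into paragraphs at blank lines, then chunks each paragraph into slides of size
-- max(max_lines,1); a different decomposition than A's single stateful scan (same cost, no speedup claimed).

-- ===== PORT A =====
-- one iteration of A's for-loop; state = (slides, current)
def stepA (max_lines : Int) (st : List String × List String) (line : String) :
    List String × List String :=
  if line = "" then
    if st.2 = [] then st
    else (st.1 ++ [PySem.Str.join "\n" st.2], [])
  else
    let cur := st.2 ++ [line]
    if max_lines ≤ (cur.length : Int) then (st.1 ++ [PySem.Str.join "\n" cur], [])
    else (st.1, cur)

def format_text_blocks (text : String) (max_lines : Int) : String :=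
  let lines := (PySem.Str.splitlines text).map (fun line => PySem.Str.strip line)
  let st := List.foldl (stepA max_lines) ([], []) lines
  PySem.Str.join "\n\n" (if st.2 = [] then st.1 else st.1 ++ [PySem.Str.join "\n" st.2])

-- ===== PORT B =====
-- one iteration of B's paragraph-grouping loop; state = (paras, group)
def stepP (st : List (List String) × List String) (line : String) :
    List (List String) × List String :=
  if line ≠ "" then (st.1, st.2 ++ [line])
  else if st.2 ≠ [] then (st.1 ++ [st.2], [])
  else st

-- B's inner while loop: slides of p, k lines each.  p[:k] is List.take k p and
-- p[k:] (for k ≥ 1, p = x :: rest) is rest.drop (k-1); exact since B's k = max(max_lines,1) ≥ 1.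
def chunksB (k : Nat) : List String → List String
  | [] => []
  | x :: rest =>
      PySem.Str.join "\n" (List.take k (x :: rest)) :: chunksB k (rest.drop (k - 1))
termination_by p => p.length
decreasing_by
  simp only [List.length_drop, List.length_cons]; omega

def format_text_blocks_alt (text : String) (max_lines : Int) : String :=
  let step : Int := max max_lines 1
  let lines := (PySem.Str.splitlines text).map (fun line => PySem.Str.strip line)
  let st := List.foldl stepP ([], []) lines
  let paras := if st.2 = [] then st.1 else st.1 ++ [st.2]
  PySem.Str.join "\n\n" (paras.flatMap (chunksB step.toNat))

-- ===== PRECONDITION & SPEC =====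
def Spec_format_text_blocks (text : String) (max_lines : Int) (out : String) : Prop := out = format_text_blocks_alt text max_lines
instance (text : String) (max_lines : Int) (out : String) : Decidable (Spec_format_text_blocks text max_lines out) := by unfold Spec_format_text_blocks; infer_instance

-- ===== CLAIM (what is proved, stated in full; the proofs are below) =====
def Claim_equal_format_text_blocks : Prop := ∀ (text : String) (max_lines : Int), Dom_format_text_blocks text max_lines → Spec_format_text_blocks text max_lines (format_text_blocks text max_lines)

-- ===== LEMMAS AND PROOFS =====

-- the slide size B uses, as a Nat
def kOf (ml : Int) : Nat := (max ml 1).toNat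

theorem kOf_pos (ml : Int) : 1 ≤ kOf ml := by
  unfold kOf
  have h := le_max_right ml 1
  omega

-- A's flush test 'max_lines ≤ n' agrees with 'kOf max_lines ≤ n' for n ≥ 1
theorem cond_iff (ml : Int) (n : Nat) (hn : 1 ≤ n) : (ml ≤ (n : Int)) ↔ kOf ml ≤ n := by
  unfold kOf
  by_cases h : ml ≤ 1
  · rw [max_eq_right h]
    constructor <;> intro _ <;> omega
  · rw [max_eq_left (le_of_not_ge (by omega))]
    omega

-- a nonempty paragraph shorter than k is a single slide
theorem chunksB_small (k : Nat) (p : List String) (h1 : p ≠ []) (h2 : p.length ≤ k) :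
    chunksB k p = [PySem.Str.join "\n" p] := by
  cases p with
  | nil => exact absurd rfl h1
  | cons x rest =>
      rw [chunksB]
      have hr : rest.drop (k - 1) = [] := by
        apply List.drop_eq_nil_of_le
        simp only [List.length_cons] at h2; omega
      rw [hr, List.take_of_length_le h2, chunksB]

-- a full first chunk splits off
theorem chunksB_flush (k : Nat) (hk : 1 ≤ k) (p q : List String) (h : p.length = k) :
    chunksB k (p ++ q) = PySem.Str.join "\n" p :: chunksB k q := by
  cases p with
  | nil => simp at h; omega
  | cons x rest =>
      rw [List.cons_append, chunksB]
      simp only [List.length_cons] at h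
      have ht : List.take k (x :: (rest ++ q)) = x :: rest := by
        have : k = rest.length + 1 := by omega
        subst this
        rw [List.take_succ_cons, List.take_left]
      have hd : (rest ++ q).drop (k - 1) = q := by
        have : k - 1 = rest.length := by omega
        rw [this, List.drop_left]
      rw [ht, hd]

-- the paragraphs still to be produced, given the pending group g
def parasF : List String → List String → List (List String)
  | [], g => if g = [] then [] else [g]
  | l :: ls, g =>
      if l = "" then (if g = [] then parasF ls [] else g :: parasF ls [])
      else parasF ls (g ++ [l])

-- B's grouping fold computes parasF
theorem bfold_eq (lines : List String) : ∀ (ps : List (List String)) (g : List String),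
    (let st := List.foldl stepP (ps, g) lines;
     if st.2 = [] then st.1 else st.1 ++ [st.2]) = ps ++ parasF lines g := by
  induction lines with
  | nil =>
      intro ps g
      simp only [List.foldl_nil, parasF]
      split <;> simp
  | cons l ls ih =>
      intro ps g
      simp only [List.foldl_cons, parasF, stepP]
      by_cases hl : l = ""
      · by_cases hg : g = [] <;>
          simp only [hl, hg, if_pos, if_neg, ne_eq, not_true_eq_false, not_false_eq_true,
            ih] <;> simp [List.append_assoc]
      · simp [hl, ih]
  -- (the simp set above normalises the if-structure of stepP in each branch)

-- a group with a full k-prefix: the prefix becomes a slide no matter how the paragraph continues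
theorem parasM (k : Nat) (hk : 1 ≤ k) :
    ∀ (ls g1 g2 : List String), g1.length = k →
    (parasF ls (g1 ++ g2)).flatMap (chunksB k)
      = PySem.Str.join "\n" g1 :: (parasF ls g2).flatMap (chunksB k) := by
  intro ls
  induction ls with
  | nil =>
      intro g1 g2 h
      have hg1 : g1 ≠ [] := by intro hc; rw [hc] at h; simp at h; omega
      by_cases hg2 : g2 = []
      · subst hg2
        simp only [parasF, List.append_nil, if_neg hg1, List.flatMap_cons, List.flatMap_nil,
          List.append_nil, ite_true]
        rw [chunksB_small k g1 hg1 (le_of_eq h)]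
      · have hne : g1 ++ g2 ≠ [] := by simp [hg1]
        simp only [parasF, if_neg hne, if_neg hg2, List.flatMap_cons, List.flatMap_nil,
          List.append_nil]
        rw [chunksB_flush k hk g1 g2 h]
  | cons l ls ih =>
      intro g1 g2 h
      have hg1 : g1 ≠ [] := by intro hc; rw [hc] at h; simp at h; omega
      by_cases hl : l = ""
      · by_cases hg2 : g2 = []
        · subst hg2
          simp only [parasF, hl, List.append_nil, if_neg hg1, List.flatMap_cons, ite_true]
          rw [chunksB_small k g1 hg1 (le_of_eq h)]
          simp
        · have hne : g1 ++ g2 ≠ [] := by simp [hg1]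
          simp only [parasF, hl, if_neg hne, if_neg hg2, List.flatMap_cons, ite_true]
          rw [chunksB_flush k hk g1 g2 h]
          simp
      · simp only [parasF, if_neg hl, List.append_assoc]
        exact ih g1 (g2 ++ [l]) h

-- main invariant: A's scan, from pending current c (shorter than a slide), produces
-- exactly the slides B makes from the remaining paragraphs
theorem scan_eq (ml : Int) (lines : List String) : ∀ (ss : List String) (c : List String),
    c.length < kOf ml →
    (let st := List.foldl (stepA ml) (ss, c) lines;
     if st.2 = [] then st.1 else st.1 ++ [PySem.Str.join "\n" st.2])
      = ss ++ (parasF lines c).flatMap (chunksB (kOf ml)) := by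
  induction lines with
  | nil =>
      intro ss c hc
      simp only [List.foldl_nil, parasF]
      by_cases hcz : c = []
      · simp [hcz]
      · simp only [if_neg hcz, List.flatMap_cons, List.flatMap_nil, List.append_nil,
          chunksB_small (kOf ml) c hcz hc.le]
  | cons l ls ih =>
      intro ss c hc
      simp only [List.foldl_cons, parasF]
      by_cases hl : l = ""
      · by_cases hcz : c = []
        · simp only [stepA, hl, hcz, ite_true]
          exact ih ss [] (by simpa using kOf_pos ml)
        · simp only [stepA, hl, ite_true, if_neg hcz]
          rw [ih (ss ++ [PySem.Str.join "\n" c]) [] (by simpa using kOf_pos ml)]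
          simp only [List.flatMap_cons, chunksB_small (kOf ml) c hcz hc.le]
          simp
      · simp only [stepA, if_neg hl]
        have hlen : ((c ++ [l]).length : Int) = (c.length : Int) + 1 := by simp
        by_cases hfl : ml ≤ ((c ++ [l]).length : Int)
        · have hk : (c ++ [l]).length = kOf ml := by
            have h1 : 1 ≤ (c ++ [l]).length := by simp
            have := (cond_iff ml (c ++ [l]).length h1).mp hfl
            simp only [List.length_append, List.length_cons, List.length_nil] at this hc ⊢
            omega
          simp only [if_pos hfl]
          rw [ih (ss ++ [PySem.Str.join "\n" (c ++ [l])]) [] (by simpa using kOf_pos ml)]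
          have := parasM (kOf ml) (kOf_pos ml) ls (c ++ [l]) [] hk
          simp only [List.append_nil] at this
          rw [this]
          simp
        · have hk' : (c ++ [l]).length < kOf ml := by
            have h1 : 1 ≤ (c ++ [l]).length := by simp
            have := (cond_iff ml (c ++ [l]).length h1).not.mp hfl
            omega
          simp only [if_neg hfl]
          exact ih ss (c ++ [l]) hk'

-- ===== VERDICT (by name: the statement is the Claim_ definition above) =====
theorem format_text_blocks_spec : Claim_equal_format_text_blocks := by
  intro text ml _
  unfold Spec_format_text_blocks format_text_blocks format_text_blocks_alt
  have hA := scan_eq ml ((PySem.Str.splitlines text).map (fun line => PySem.Str.strip line))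
    [] [] (by simpa using kOf_pos ml)
  have hB := bfold_eq ((PySem.Str.splitlines text).map (fun line => PySem.Str.strip line)) [] []
  simp only [List.nil_append] at hA hB
  simp only [hA, hB, kOf]
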